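-- pv_equiv track=rewrite | github.com/Caiyun-AI/GAR | GAR/code/GAR_utils.py | locate_bos
-- ===== SOURCE A (Python) =====
-- def locate_bos(tokens, bos_token):
--     bos_indices = []
--     found_in_example = False
--     for i, token in reversed(list(enumerate(tokens))):
--         if token == bos_token and not found_in_example:
--             bos_indices.insert(0, i)
--             found_in_example = True
--         elif token == '\n':
--             found_in_example = False
--     return bos_indices
-- ===== SOURCE B (Python) =====
-- def _last_bos(segment, bos_token):
--     for i, t in reversed(segment):
--         if t == bos_token:
--             return [i]
--     return []
--
-- def locate_bos(tokens, bos_token):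
--     result = []
--     segment = []
--     for i, t in enumerate(tokens):
--         if t == '\n':
--             result += _last_bos(segment, bos_token)
--             segment = []
--         else:
--             segment.append((i, t))
--     return result + _last_bos(segment, bos_token)
-- ===== Notes on version B (the rewrite author's own statement) =====
-- stated objective: alternative
-- what changed: Replaces A's reverse scan with a found-flag and insert(0,...) by a forward pass that buffers the current newline-delimited segment and, at each newline and at the end, appends the last bos index of that buffered segment via a helper; Pre_ excludes the degenerate bos_token == '\n' corner where A's branch precedence picks alternating newlines.
-- outside the precondition, e.g. on locate_bos(['\n', '\n', '\n'], '\n'): A returns [0, 2], B returns []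
import Mathlib
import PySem

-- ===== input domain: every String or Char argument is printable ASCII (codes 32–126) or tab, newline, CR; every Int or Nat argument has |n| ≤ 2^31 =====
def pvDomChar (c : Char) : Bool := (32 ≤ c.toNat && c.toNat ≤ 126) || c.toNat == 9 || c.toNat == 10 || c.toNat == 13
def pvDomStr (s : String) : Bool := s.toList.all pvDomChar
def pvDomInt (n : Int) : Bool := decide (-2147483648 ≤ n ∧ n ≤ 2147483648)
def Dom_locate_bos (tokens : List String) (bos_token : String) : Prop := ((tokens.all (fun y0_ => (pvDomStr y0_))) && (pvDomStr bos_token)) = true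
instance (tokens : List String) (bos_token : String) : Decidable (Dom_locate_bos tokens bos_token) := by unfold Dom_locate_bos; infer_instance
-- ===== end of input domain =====

-- B buffers the current newline-delimited segment in a forward pass and, at each newline and
-- at the end, appends the last bos index of the buffered segment (helper reverse-scans the
-- buffer) — a different decomposition of A's global reverse scan with a found-flag; same cost.

-- ===== PORT A =====
-- state = (bos_indices, found_in_example); reversed(list(enumerate(tokens))) then the loop body
def locate_bos_step (bos_token : String) (st : List Int × Bool) (p : Int × String) :
    List Int × Bool :=
  if p.2 = bos_token ∧ st.2 = false then (p.1 :: st.1, true)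
  else if p.2 = "\n" then (st.1, false)
  else st

def locate_bos (tokens : List String) (bos_token : String) : List Int :=
  ((PySem.List.enumerate tokens).reverse.foldl (locate_bos_step bos_token) ([], false)).1

-- ===== PORT B =====
-- _last_bos: reverse scan of the buffered segment, first match wins
def lastBosRev (bos : String) : List (Int × String) → List Int
  | [] => []
  | (i, t) :: r => if t = bos then [i] else lastBosRev bos r

def lastBosSeg (segment : List (Int × String)) (bos : String) : List Int :=
  lastBosRev bos segment.reverse

-- loop body: state = (result, segment); newline flushes the buffer, anything else is buffered
def locate_bos_alt_step (bos : String) (st : List Int × List (Int × String))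
    (p : Int × String) : List Int × List (Int × String) :=
  if p.2 = "\n" then (st.1 ++ lastBosSeg st.2 bos, [])
  else (st.1, st.2 ++ [p])

def locate_bos_alt (tokens : List String) (bos_token : String) : List Int :=
  let st := (PySem.List.enumerate tokens).foldl (locate_bos_alt_step bos_token) ([], [])
  st.1 ++ lastBosSeg st.2 bos_token

-- ===== PRECONDITION & SPEC =====
-- Pre_ excludes the degenerate configuration bos_token = "\n" (the marker equal to the segment
-- delimiter): A still returns there, but which newlines to report is anybody's choice on that
-- corner — A's branch order picks alternating newlines from the right, B reports none.
def Pre_locate_bos (tokens : List String) (bos_token : String) : Prop := bos_token ≠ "\n"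
instance (tokens : List String) (bos_token : String) : Decidable (Pre_locate_bos tokens bos_token) := by unfold Pre_locate_bos; infer_instance
def pvWitness_locate_bos : List String × String := (["a", "<s>", "b", "\n", "<s>"], "<s>")

def Spec_locate_bos (tokens : List String) (bos_token : String) (out : List Int) : Prop := out = locate_bos_alt tokens bos_token
instance (tokens : List String) (bos_token : String) (out : List Int) : Decidable (Spec_locate_bos tokens bos_token out) := by unfold Spec_locate_bos; infer_instance

-- ===== CLAIM (what is proved, stated in full; the proofs are below) =====
def Claim_equal_locate_bos : Prop := ∀ (tokens : List String) (bos_token : String), Dom_locate_bos tokens bos_token → Pre_locate_bos tokens bos_token → Spec_locate_bos tokens bos_token (locate_bos tokens bos_token)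

-- ===== LEMMAS AND PROOFS =====

-- Reference function: pending last-bos option, emitted at a newline or at the end.
def lbRef (bos : String) : Option Int → List (Int × String) → List Int
  | last, [] => last.toList
  | last, (i, t) :: r =>
      if t = bos then lbRef bos (some i) r
      else if t = "\n" then last.toList ++ lbRef bos none r
      else lbRef bos last r

-- Does the first newline-delimited segment of l contain a bos token?
def lbHas (bos : String) : List (Int × String) → Bool
  | [] => false
  | (_, t) :: r => if t = bos then true else if t = "\n" then false else lbHas bos r

theorem lbRef_some (bos : String) (r : List (Int × String)) (j : Int) :
    lbRef bos (some j) r = if lbHas bos r then lbRef bos none r else j :: lbRef bos none r := by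
  induction r generalizing j with
  | nil => simp [lbRef, lbHas]
  | cons p r ih =>
    obtain ⟨i, t⟩ := p
    by_cases hb : t = bos
    · simp [lbRef, lbHas, hb, ih]
    · by_cases hn : t = "\n"
      · have hbn : ¬ ("\n" = bos) := fun h => hb (by rw [hn]; exact h)
        simp [lbRef, lbHas, hb, hn, hbn, ih]
      · simp [lbRef, lbHas, hb, hn, ih]

-- A's foldr (= foldl over the reverse) computes (lbRef none, lbHas).
theorem locate_bos_foldr (bos : String) (hb : bos ≠ "\n") (l : List (Int × String)) :
    l.foldr (fun p st => locate_bos_step bos st p) ([], false)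
      = (lbRef bos none l, lbHas bos l) := by
  induction l with
  | nil => simp [lbRef, lbHas]
  | cons p l ih =>
    obtain ⟨i, t⟩ := p
    have hb' : ¬ ("\n" = bos) := fun h => hb h.symm
    rw [List.foldr_cons, ih]
    by_cases htb : t = bos
    · by_cases hh : lbHas bos l <;>
        simp [locate_bos_step, lbRef, lbHas, htb, hb, hb', hh, lbRef_some]
    · by_cases htn : t = "\n" <;>
        simp [locate_bos_step, lbRef, lbHas, htb, htn, hb']

-- Reference for B: pending LIST of last-bos indices (empty or a singleton).
def lbRefL (bos : String) : List Int → List (Int × String) → List Int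
  | pend, [] => pend
  | pend, (i, t) :: r =>
      if t = "\n" then pend ++ lbRefL bos [] r
      else if t = bos then lbRefL bos [i] r
      else lbRefL bos pend r

theorem lbRefL_eq_lbRef (bos : String) (hb : bos ≠ "\n") (l : List (Int × String))
    (last : Option Int) : lbRefL bos last.toList l = lbRef bos last l := by
  induction l generalizing last with
  | nil => simp [lbRefL, lbRef]
  | cons p l ih =>
    obtain ⟨i, t⟩ := p
    have hbn : ¬ ("\n" = bos) := fun h => hb h.symm
    by_cases htn : t = "\n"
    · simpa [lbRefL, lbRef, htn, hbn, hb] using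
        congrArg (fun xs => last.toList ++ xs) (ih none)
    · by_cases htb : t = bos
      · simpa [lbRefL, lbRef, htn, htb, hb] using ih (some i)
      · simpa [lbRefL, lbRef, htn, htb] using ih last

theorem lastBosSeg_append (bos : String) (seg : List (Int × String)) (i : Int) (t : String) :
    lastBosSeg (seg ++ [(i, t)]) bos = if t = bos then [i] else lastBosSeg seg bos := by
  simp [lastBosSeg, List.reverse_append, lastBosRev]

-- B's foldl from an arbitrary state, finalized, is res ++ lbRefL (lastBosSeg seg) l.
theorem locate_bos_alt_foldl (bos : String) (l : List (Int × String))
    (res : List Int) (seg : List (Int × String)) :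
    (l.foldl (locate_bos_alt_step bos) (res, seg)).1
        ++ lastBosSeg (l.foldl (locate_bos_alt_step bos) (res, seg)).2 bos
      = res ++ lbRefL bos (lastBosSeg seg bos) l := by
  induction l generalizing res seg with
  | nil => simp [lbRefL]
  | cons p l ih =>
    obtain ⟨i, t⟩ := p
    by_cases htn : t = "\n"
    · rw [List.foldl_cons]
      simp only [locate_bos_alt_step, htn, if_pos]
      rw [ih]
      simp [lbRefL, lastBosSeg, lastBosRev]
    · rw [List.foldl_cons]
      simp only [locate_bos_alt_step, htn, if_false]
      rw [ih, lastBosSeg_append]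
      by_cases htb : t = bos
      · have hbn : ¬ (bos = "\n") := htb ▸ htn
        simp [lbRefL, htn, htb, hbn]
      · simp [lbRefL, htn, htb]

-- ===== VERDICT (by name: the statement is the Claim_ definition above) =====
theorem locate_bos_spec : Claim_equal_locate_bos := by
  intro tokens bos_token _ hpre
  unfold Spec_locate_bos locate_bos locate_bos_alt
  rw [List.foldl_reverse, locate_bos_foldr bos_token hpre]
  have hB := locate_bos_alt_foldl bos_token (PySem.List.enumerate tokens) [] []
  have hL := lbRefL_eq_lbRef bos_token hpre (PySem.List.enumerate tokens) none
  simp only [lastBosSeg, List.reverse_nil, lastBosRev, List.nil_append, Option.toList] at hB hL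
  simp only [lastBosSeg]
  rw [hB, hL]
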